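-- pv_equiv track=rewrite | github.com/8n8/trumat | rules.py | remove_newline_before_close_bracket
-- ===== SOURCE A (Python) =====
-- def remove_newline_before_close_bracket(old):
--     new = ""
--     for i, c in enumerate(old):
--         if c == "\n":
--             try:
--                 if old[i + 1] == "M":
--                     continue
--
--             except IndexError:
--                 pass
--
--         new += c
--
--     return new, None
-- ===== SOURCE B (Python) =====
-- def remove_newline_before_close_bracket(old):
--     parts = old.split("\n")
--     new = parts[0]
--     for seg in parts[1:]:
--         if seg.startswith("M"):
--             new += seg
--         else:
--             new += "\n" + seg
--     return new, None
-- ===== Notes on version B (the rewrite author's own statement) =====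
-- stated objective: simpler
-- what changed: Instead of scanning character by character with an indexed lookahead and try/except, B splits the string on newlines once and rejoins the segments, dropping the separating newline exactly before segments that start with 'M'.
import Mathlib
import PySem

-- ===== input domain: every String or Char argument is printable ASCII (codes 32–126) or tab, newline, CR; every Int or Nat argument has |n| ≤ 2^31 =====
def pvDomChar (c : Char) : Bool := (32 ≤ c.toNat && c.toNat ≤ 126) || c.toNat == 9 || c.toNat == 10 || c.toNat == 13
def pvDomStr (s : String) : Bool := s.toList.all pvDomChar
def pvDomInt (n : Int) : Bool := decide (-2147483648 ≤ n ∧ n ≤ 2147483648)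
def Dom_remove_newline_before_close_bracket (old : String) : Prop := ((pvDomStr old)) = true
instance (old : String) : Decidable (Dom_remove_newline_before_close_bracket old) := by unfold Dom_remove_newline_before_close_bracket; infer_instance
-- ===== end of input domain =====

-- B rebuilds the string from old.split("\n") segments (dropping the separator before segments
-- starting with 'M') instead of A's character scan with indexed lookahead: simpler decomposition.

-- ===== PORT A =====
-- the loop body of A: 'continue' (skip the char) iff c == '\n' and old[i+1] == 'M'; IndexError → keep it
def pvStepA (cs : List Char) (acc : List Char) (ic : Int × Char) : List Char :=
  if ic.2 = '\n' ∧ PySem.List.pyGet? cs (ic.1 + 1) = some 'M' then acc else acc ++ [ic.2]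

def remove_newline_before_close_bracket (old : String) : String × Option String :=
  let cs := old.toList
  let new := (PySem.List.enumerate cs 0).foldl (pvStepA cs) []
  (String.ofList new, none)

-- ===== PORT B =====
-- the loop body of B: append the segment, keeping its separating '\n' unless it starts with 'M'
def pvStepB (acc seg : List Char) : List Char :=
  if PySem.Chars.startswith seg ['M'] then acc ++ seg else acc ++ '\n' :: seg

def remove_newline_before_close_bracket_alt (old : String) : String × Option String :=
  let parts := PySem.Chars.splitOn old.toList ['\n']
  -- parts[0]: split always returns a non-empty list, so headD is exact
  let new := (parts.drop 1).foldl pvStepB (parts.headD [])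
  (String.ofList new, none)

-- ===== PRECONDITION & SPEC =====
def Spec_remove_newline_before_close_bracket (old : String) (out : String × Option String) : Prop := out = remove_newline_before_close_bracket_alt old
instance (old : String) (out : String × Option String) : Decidable (Spec_remove_newline_before_close_bracket old out) := by unfold Spec_remove_newline_before_close_bracket; infer_instance

-- ===== CLAIM (what is proved, stated in full; the proofs are below) =====
def Claim_equal_remove_newline_before_close_bracket : Prop := ∀ (old : String), Dom_remove_newline_before_close_bracket old → Spec_remove_newline_before_close_bracket old (remove_newline_before_close_bracket old)

-- ===== LEMMAS AND PROOFS =====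

-- common reference function: keep each char unless it is '\n' immediately followed by 'M'
def pvG : List Char → List Char
  | [] => []
  | c :: rest => (if c = '\n' ∧ rest.head? = some 'M' then [] else [c]) ++ pvG rest

-- reference split: recursive single-char split on '\n'
def pvS : List Char → List (List Char)
  | [] => [[]]
  | c :: rest =>
    if c = '\n' then [] :: pvS rest
    else match pvS rest with
      | [] => [[c]]
      | p :: ps => (c :: p) :: ps

theorem pvS_newline (rest : List Char) : pvS ('\n' :: rest) = [] :: pvS rest := by
  simp [pvS]

theorem pvS_cons (c : Char) (rest : List Char) (h : ¬ c = '\n') :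
    pvS (c :: rest) = match pvS rest with
      | [] => [[c]]
      | p :: ps => (c :: p) :: ps := by
  simp [pvS, h]

theorem pvS_ne_nil (l : List Char) : pvS l ≠ [] := by
  cases l with
  | nil => simp [pvS]
  | cons c rest =>
    by_cases h : c = '\n'
    · subst h; rw [pvS_newline]; simp
    · rw [pvS_cons c rest h]
      cases hS : pvS rest <;> simp

theorem pvS_head_head? (l : List Char) :
    ((pvS l).headD []).head? = if l.head? = some '\n' then none else l.head? := by
  cases l with
  | nil => simp [pvS]
  | cons c rest =>
    by_cases h : c = '\n'
    · subst h; rw [pvS_newline]; simp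
    · rw [pvS_cons c rest h]
      cases hS : pvS rest with
      | nil => exact absurd hS (pvS_ne_nil rest)
      | cons p ps => simp [h]

theorem pv_go_cons (f : Nat) (c : Char) (rest cur : List Char) (acc : List (List Char)) :
    PySem.Chars.splitOn.go ['\n'] (f + 1) (c :: rest) cur acc
      = if c = '\n' then PySem.Chars.splitOn.go ['\n'] f rest [] (cur.reverse :: acc)
        else PySem.Chars.splitOn.go ['\n'] f rest (c :: cur) acc := by
  by_cases h : c = '\n'
  · subst h; simp [PySem.Chars.splitOn.go, List.isPrefixOf]
  · simp [PySem.Chars.splitOn.go, List.isPrefixOf, h, Ne.symm h]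

theorem pv_go_eq (l : List Char) : ∀ (fuel : Nat) (cur : List Char) (acc : List (List Char)),
    l.length ≤ fuel →
    PySem.Chars.splitOn.go ['\n'] fuel l cur acc
      = acc.reverse ++ (pvS l).modifyHead (cur.reverse ++ ·) := by
  induction l with
  | nil =>
    intro fuel cur acc _
    cases fuel <;> simp [PySem.Chars.splitOn.go, pvS]
  | cons c rest ih =>
    intro fuel cur acc hle
    cases fuel with
    | zero => simp at hle
    | succ f =>
      have hf : rest.length ≤ f := by simpa using hle
      rw [pv_go_cons]
      by_cases h : c = '\n'
      · subst h
        rw [if_pos rfl, ih f [] (cur.reverse :: acc) hf, pvS_newline]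
        cases hS : pvS rest with
        | nil => exact absurd hS (pvS_ne_nil rest)
        | cons p ps => simp
      · rw [if_neg h, ih f (c :: cur) acc hf, pvS_cons c rest h]
        cases hS : pvS rest with
        | nil => exact absurd hS (pvS_ne_nil rest)
        | cons p ps => simp

theorem pv_splitOn_eq (l : List Char) : PySem.Chars.splitOn l ['\n'] = pvS l := by
  unfold PySem.Chars.splitOn
  rw [pv_go_eq l (l.length + 1) [] [] (by omega)]
  cases pvS l <;> simp

-- A's fold equals pvG, generalized over the already-consumed prefix
theorem pvA_fold (suf : List Char) : ∀ (pre acc : List Char),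
    (PySem.List.enumerate suf (pre.length : Int)).foldl (pvStepA (pre ++ suf)) acc
      = acc ++ pvG suf := by
  induction suf with
  | nil => intro pre acc; simp [PySem.List.enumerate_nil, pvG]
  | cons c suf' ih =>
    intro pre acc
    rw [PySem.List.enumerate_cons]
    have hidx : PySem.List.pyGet? (pre ++ c :: suf') ((pre.length : Int) + 1) = suf'.head? := by
      have h1 : ((pre.length : Int) + 1) = ((pre.length + 1 : Nat) : Int) := by push_cast; ring
      rw [h1, PySem.List.pyGet?_natCast]
      have h2 : pre ++ c :: suf' = (pre ++ [c]) ++ suf' := by simp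
      have h3 : pre.length + 1 = (pre ++ [c]).length := by simp
      rw [h2, h3, List.getElem?_append_right (by omega)]
      simp [List.head?_eq_getElem?]
    have hpre : pre ++ c :: suf' = (pre ++ [c]) ++ suf' := by simp
    have hstart : (pre.length : Int) + 1 = (((pre ++ [c]).length : Nat) : Int) := by
      simp
    simp only [List.foldl_cons]
    rw [hstart, hpre, ih (pre ++ [c]) _]
    have hstep : pvStepA ((pre ++ [c]) ++ suf') acc ((pre.length : Int), c)
        = acc ++ (if c = '\n' ∧ suf'.head? = some 'M' then [] else [c]) := by
      rw [← hpre]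
      simp only [pvStepA, hidx]
      split_ifs <;> simp
    rw [hstep, pvG]
    simp

-- appending to the accumulator commutes with B's fold
theorem pv_foldB_append (ps : List (List Char)) : ∀ (a b : List Char),
    ps.foldl pvStepB (a ++ b) = a ++ ps.foldl pvStepB b := by
  induction ps with
  | nil => intro a b; simp
  | cons p ps ihp =>
    intro a b
    simp only [List.foldl_cons]
    have : pvStepB (a ++ b) p = a ++ pvStepB b p := by
      simp only [pvStepB]; split_ifs <;> simp
    rw [this, ihp]

theorem pv_startswith_M (rest : List Char) (p : List Char) (ps : List (List Char))
    (hS : pvS rest = p :: ps) :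
    (PySem.Chars.startswith p ['M'] = true) ↔ rest.head? = some 'M' := by
  have hh := pvS_head_head? rest
  rw [hS] at hh
  simp only [List.headD_cons] at hh
  constructor
  · intro hsw
    rcases (by simpa [PySem.Chars.startswith, List.isPrefixOf_iff_prefix] using hsw :
      ['M'] <+: p) with ⟨t, ht⟩
    have hp : p.head? = some 'M' := by rw [← ht]; rfl
    rw [hp] at hh
    split_ifs at hh with hnl
    exact hh.symm
  · intro hr
    rw [hr] at hh
    split_ifs at hh with hnl
    · exact absurd hnl (by simp)
    · cases p with
      | nil => simp at hh
      | cons x xs =>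
        simp at hh
        simp [PySem.Chars.startswith, List.isPrefixOf, hh]

-- B's fold over the split segments also equals pvG
theorem pvB_fold (l : List Char) :
    ((pvS l).drop 1).foldl pvStepB ((pvS l).headD []) = pvG l := by
  induction l with
  | nil => simp [pvS, pvG]
  | cons c rest ih =>
    by_cases h : c = '\n'
    · subst h
      rw [pvS_newline]
      cases hS : pvS rest with
      | nil => exact absurd hS (pvS_ne_nil rest)
      | cons p ps =>
        simp only [List.drop_succ_cons, List.drop_zero, List.headD_cons, List.foldl_cons]
        have hG : pvG ('\n' :: rest) = (if rest.head? = some 'M' then [] else ['\n']) ++ pvG rest := by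
          simp [pvG]
        rw [hG, ← ih, hS]
        simp only [List.drop_succ_cons, List.drop_zero, List.headD_cons]
        by_cases hM : rest.head? = some 'M'
        · have hstepB : pvStepB [] p = [] ++ p := by
            simp only [pvStepB]
            rw [if_pos ((pv_startswith_M rest p ps hS).mpr hM)]
          rw [hstepB, pv_foldB_append, if_pos hM]
        · have hstepB : pvStepB [] p = ['\n'] ++ p := by
            simp only [pvStepB]
            rw [if_neg (fun hc => hM ((pv_startswith_M rest p ps hS).mp hc))]
            rfl
          rw [hstepB, pv_foldB_append, if_neg hM]
    · rw [pvS_cons c rest h]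
      cases hS : pvS rest with
      | nil => exact absurd hS (pvS_ne_nil rest)
      | cons p ps =>
        simp only [List.drop_succ_cons, List.drop_zero, List.headD_cons]
        have hG : pvG (c :: rest) = [c] ++ pvG rest := by
          cases hr : rest.head? <;> simp [pvG, h, hr]
        rw [hG, ← ih, hS]
        simp only [List.drop_succ_cons, List.drop_zero, List.headD_cons]
        have hcp : (c :: p) = [c] ++ p := rfl
        rw [hcp, pv_foldB_append]

-- ===== VERDICT (by name: the statement is the Claim_ definition above) =====
theorem remove_newline_before_close_bracket_spec : Claim_equal_remove_newline_before_close_bracket := by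
  intro old _
  unfold Spec_remove_newline_before_close_bracket
  unfold remove_newline_before_close_bracket remove_newline_before_close_bracket_alt
  simp only [pv_splitOn_eq, pvB_fold]
  have := pvA_fold old.toList [] []
  simp only [List.length_nil, Nat.cast_zero, List.nil_append] at this
  rw [this]
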